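-- pv_equiv track=rewrite | github.com/YezhouLiu/cPSim-version1 | toolbox.py | EliminateDictOverlap
-- ===== SOURCE A (Python) =====
-- from copy import deepcopy
--
-- def EliminateDictOverlap(d1, d2):
--     dict1 = deepcopy(d1)
--     dict2 = deepcopy(d2)
--     for x in d1:
--         if x in d2:
--             if d1[x] > d2[x]:
--                 dict1[x] -= d2[x]
--                 dict2.pop(x)
--             elif d1[x] < d2[x]:
--                 dict2[x] -= d1[x]
--                 dict1.pop(x)
--             else:
--                 dict1.pop(x)
--                 dict2.pop(x)
--     return dict1, dict2
-- ===== SOURCE B (Python) =====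
-- from copy import deepcopy
--
-- def EliminateDictOverlap(d1, d2):
--     dict1 = {x: (v - d2[x] if x in d2 else deepcopy(v))
--              for x, v in d1.items() if x not in d2 or v > d2[x]}
--     dict2 = {y: (w - d1[y] if y in d1 else deepcopy(w))
--              for y, w in d2.items() if y not in d1 or w > d1[y]}
--     return dict1, dict2
-- ===== Notes on version B (the rewrite author's own statement) =====
-- stated objective: simpler
-- what changed: Instead of deepcopying both dicts and destructively popping/mutating them in one loop over d1, B builds each result dict independently with a single comprehension over its own source dict (keep, subtract, or drop per key).
import Mathlib
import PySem

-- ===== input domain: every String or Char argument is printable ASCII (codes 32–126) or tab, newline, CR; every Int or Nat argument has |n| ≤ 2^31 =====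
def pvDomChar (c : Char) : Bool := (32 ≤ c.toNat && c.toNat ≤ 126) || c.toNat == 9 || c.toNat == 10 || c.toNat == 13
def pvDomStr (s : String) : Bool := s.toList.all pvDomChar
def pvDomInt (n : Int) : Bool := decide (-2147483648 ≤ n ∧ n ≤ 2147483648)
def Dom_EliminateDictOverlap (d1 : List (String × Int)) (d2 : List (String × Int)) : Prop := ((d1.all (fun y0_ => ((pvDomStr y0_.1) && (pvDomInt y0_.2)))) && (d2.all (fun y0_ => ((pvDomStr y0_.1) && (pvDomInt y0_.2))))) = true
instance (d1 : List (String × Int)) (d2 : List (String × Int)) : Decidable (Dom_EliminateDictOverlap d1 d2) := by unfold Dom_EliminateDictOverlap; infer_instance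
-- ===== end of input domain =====

-- B builds dict1 and dict2 independently, each by one comprehension over its own source dict,
-- instead of A's deepcopy-then-mutate loop over d1. Objective: simpler.

-- ===== PORT A =====
-- A: dict1/dict2 start as copies of d1/d2; one loop over d1's keys mutates both in place.
def EliminateDictOverlap (d1 : List (String × Int)) (d2 : List (String × Int)) : (List (String × Int)) × (List (String × Int)) :=
  let D1 := PySem.Dict.ofList d1
  let D2 := PySem.Dict.ofList d2
  let r := D1.keys.foldl
    (fun (p : PySem.Dict String Int × PySem.Dict String Int) x =>
      if D2.contains x then
        if D1.getD x 0 > D2.getD x 0 then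
          (p.1.modify x 0 (fun v => v - D2.getD x 0), p.2.erase x)
        else if D1.getD x 0 < D2.getD x 0 then
          (p.1.erase x, p.2.modify x 0 (fun v => v - D1.getD x 0))
        else
          (p.1.erase x, p.2.erase x)
      else p)
    (D1, D2)
  (r.1.items, r.2.items)

-- ===== PORT B =====
-- B: each result dict is one comprehension over its own source dict (keys are distinct, so the
-- dict comprehension's items are exactly the filterMap of the source items).
def EliminateDictOverlap_alt (d1 : List (String × Int)) (d2 : List (String × Int)) : (List (String × Int)) × (List (String × Int)) :=
  let D1 := PySem.Dict.ofList d1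
  let D2 := PySem.Dict.ofList d2
  let l1 := D1.items.filterMap (fun p =>
    match D2.get? p.1 with
    | some w => if p.2 > w then some (p.1, p.2 - w) else none
    | none => some p)
  let l2 := D2.items.filterMap (fun p =>
    match D1.get? p.1 with
    | some a => if p.2 > a then some (p.1, p.2 - a) else none
    | none => some p)
  (l1, l2)

-- ===== PRECONDITION & SPEC =====
def Spec_EliminateDictOverlap (d1 : List (String × Int)) (d2 : List (String × Int)) (out : (List (String × Int)) × (List (String × Int))) : Prop := out = EliminateDictOverlap_alt d1 d2
instance (d1 : List (String × Int)) (d2 : List (String × Int)) (out : (List (String × Int)) × (List (String × Int))) : Decidable (Spec_EliminateDictOverlap d1 d2 out) := by unfold Spec_EliminateDictOverlap; infer_instance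

-- ===== CLAIM (what is proved, stated in full; the proofs are below) =====
def Claim_equal_EliminateDictOverlap : Prop := ∀ (d1 : List (String × Int)) (d2 : List (String × Int)), Dom_EliminateDictOverlap d1 d2 → Spec_EliminateDictOverlap d1 d2 (EliminateDictOverlap d1 d2)


-- ===== LEMMAS AND PROOFS =====

-- The two independent per-key actions A's loop performs on dict1 and on dict2.
def pvG1 (D1 D2 : PySem.Dict String Int) (x : String) (d : PySem.Dict String Int) : PySem.Dict String Int :=
  if D2.contains x then
    if D1.getD x 0 > D2.getD x 0 then d.modify x 0 (fun v => v - D2.getD x 0) else d.erase x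
  else d

def pvG2 (D1 D2 : PySem.Dict String Int) (x : String) (d : PySem.Dict String Int) : PySem.Dict String Int :=
  if D2.contains x then
    if D1.getD x 0 > D2.getD x 0 then d.erase x
    else if D1.getD x 0 < D2.getD x 0 then d.modify x 0 (fun v => v - D1.getD x 0)
    else d.erase x
  else d

-- Item-level effect of pvG1/pvG2 at a key, as an Option-valued map.
def pvStep1 (D1 D2 : PySem.Dict String Int) (p : String × Int) : Option (String × Int) :=
  if D2.contains p.1 then
    if D1.getD p.1 0 > D2.getD p.1 0 then some (p.1, p.2 - D2.getD p.1 0) else none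
  else some p

def pvStep2 (D1 D2 : PySem.Dict String Int) (p : String × Int) : Option (String × Int) :=
  if D2.contains p.1 then
    if D1.getD p.1 0 > D2.getD p.1 0 then none
    else if D1.getD p.1 0 < D2.getD p.1 0 then some (p.1, p.2 - D1.getD p.1 0)
    else none
  else some p

lemma pvStep1_key (D1 D2 : PySem.Dict String Int) :
    ∀ p q, pvStep1 D1 D2 p = some q → q.1 = p.1 := by
  intro p q h
  unfold pvStep1 at h
  split_ifs at h
  all_goals injection h with h
  all_goals subst h
  all_goals rfl

lemma pvStep2_key (D1 D2 : PySem.Dict String Int) :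
    ∀ p q, pvStep2 D1 D2 p = some q → q.1 = p.1 := by
  intro p q h
  unfold pvStep2 at h
  split_ifs at h
  all_goals injection h with h
  all_goals subst h
  all_goals rfl

lemma pvFilterMap_some_eq_map (F : String × Int → String × Int) (l : List (String × Int)) :
    l.filterMap (fun p => some (F p)) = l.map F :=
  List.filterMap_eq_map_iff_forall_eq_some.mpr fun _ => congrFun rfl

-- keys of a key-preserving filterMap form a sublist of the original keys
lemma pvKeys_sublist (f : String × Int → Option (String × Int))
    (hf : ∀ p q, f p = some q → q.1 = p.1) (l : List (String × Int)) :
    ((l.filterMap f).map (fun p => p.1)).Sublist (l.map (fun p => p.1)) := by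
  induction l with
  | nil => simp
  | cons p l ih =>
    cases hfp : f p with
    | none => simpa [List.filterMap_cons, hfp] using ih.cons p.1
    | some q =>
      have hq := hf p q hfp
      simpa [List.filterMap_cons, hfp, hq] using ih.cons₂ p.1

-- find? at a key y ≠ x is unchanged by a filterMap that only touches key x
lemma pvFind_filterMap (step : String × Int → Option (String × Int))
    (hkey : ∀ p q, step p = some q → q.1 = p.1) (x y : String) (hxy : ¬ y = x)
    (l : List (String × Int)) :
    (l.filterMap (fun p => if p.1 = x then step p else some p)).find? (fun p => p.1 == y)
      = l.find? (fun p => p.1 == y) := by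
  induction l with
  | nil => simp
  | cons p l ih =>
    rw [List.filterMap_cons]
    by_cases hpx : p.1 = x
    · rw [if_pos hpx]
      have hpy : (p.1 == y) = false := by
        rw [beq_eq_false_iff_ne]
        exact fun h => hxy (hpx ▸ h).symm
      cases hsp : step p with
      | none =>
        rw [List.find?_cons]
        simp only [hpy]
        exact ih
      | some q =>
        have hqy : (q.1 == y) = false := by rw [hkey p q hsp]; exact hpy
        rw [List.find?_cons, List.find?_cons]
        simp only [hpy, hqy]
        exact ih
    · rw [if_neg hpx, List.find?_cons, List.find?_cons]
      by_cases hpy : (p.1 == y) = true <;> simp [hpy, ih]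

-- Main loop lemma: folding per-key actions over distinct keys is a single filterMap on the items.
lemma pvFoldl_items (g : String → PySem.Dict String Int → PySem.Dict String Int)
    (step : String × Int → Option (String × Int))
    (hkey : ∀ p q, step p = some q → q.1 = p.1)
    (E : PySem.Dict String Int) :
    ∀ ks : List String, ks.Nodup →
      (∀ x ∈ ks, ∀ d : PySem.Dict String Int, d.keys.Nodup → d.get? x = E.get? x →
        (g x d).items = d.items.filterMap (fun p => if p.1 = x then step p else some p)) →
      ∀ d : PySem.Dict String Int, d.keys.Nodup → (∀ y ∈ ks, d.get? y = E.get? y) →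
      (ks.foldl (fun d x => g x d) d).items
        = d.items.filterMap (fun p => if p.1 ∈ ks then step p else some p) := by
  intro ks
  induction ks with
  | nil =>
    intro _ _ d _ _
    simp
  | cons x ks ih =>
    intro hnd hg d hd hinv
    have hxks : x ∉ ks := (List.nodup_cons.mp hnd).1
    have hx : (g x d).items = d.items.filterMap (fun p => if p.1 = x then step p else some p) :=
      hg x (List.mem_cons_self) d hd (hinv x (List.mem_cons_self))
    have hkey1 : ∀ p q, (if p.1 = x then step p else some p) = some q → q.1 = p.1 := by
      intro p q h
      by_cases hpx : p.1 = x
      · rw [if_pos hpx] at h; exact hkey p q h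
      · rw [if_neg hpx] at h; cases h; rfl
    have hnd' : (g x d).keys.Nodup := by
      have h2 : (g x d).keys
          = (d.items.filterMap (fun p => if p.1 = x then step p else some p)).map (fun p => p.1) := by
        simp only [PySem.Dict.keys, hx]
      rw [h2]
      exact (pvKeys_sublist _ hkey1 d.items).nodup (by simpa [PySem.Dict.keys] using hd)
    have hinv' : ∀ y ∈ ks, (g x d).get? y = E.get? y := by
      intro y hy
      have hyx : ¬ y = x := fun h => hxks (h ▸ hy)
      have h3 : (g x d).get? y = d.get? y := by
        simp only [PySem.Dict.get?, hx]
        rw [pvFind_filterMap step hkey x y hyx]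
      rw [h3]; exact hinv y (List.mem_cons_of_mem x hy)
    rw [List.foldl_cons,
        ih (List.nodup_cons.mp hnd).2 (fun x' h => hg x' (List.mem_cons_of_mem _ h)) (g x d) hnd' hinv',
        hx, List.filterMap_filterMap]
    apply List.filterMap_congr
    intro p _
    by_cases hpx : p.1 = x
    · cases hsp : step p with
      | none => simp [hpx, List.mem_cons]
      | some q =>
        have hq : q.1 ∉ ks := by rw [hkey p q hsp, hpx]; exact hxks
        simp [hpx, hq, List.mem_cons]
    · simp [hpx, List.mem_cons]

-- erase on the items level, as a filterMap
lemma pvErase_filterMap (x : String) (l : List (String × Int)) :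
    l.filter (fun p => !(p.1 == x)) = l.filterMap (fun p => if p.1 = x then none else some p) := by
  induction l with
  | nil => rfl
  | cons p l ih => by_cases hpx : p.1 = x <;> simp [hpx, ih]

-- pvG1 acts on the items as pvStep1 at key x
lemma pvG1_items (D1 D2 : PySem.Dict String Int) (x : String) (hxk : x ∈ D1.keys)
    (d : PySem.Dict String Int) (hd : d.keys.Nodup) (hdx : d.get? x = D1.get? x) :
    (pvG1 D1 D2 x d).items
      = d.items.filterMap (fun p => if p.1 = x then pvStep1 D1 D2 p else some p) := by
  unfold pvG1
  by_cases hc : D2.contains x = true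
  · rw [if_pos hc]
    by_cases hab : D1.getD x 0 > D2.getD x 0
    · rw [if_pos hab]
      have h1 : D1.get? x ≠ none := fun h =>
        ((PySem.Dict.get?_eq_none_iff_not_mem_keys D1 x).mp h) hxk
      have hdc : d.contains x = true := by
        rw [PySem.Dict.contains_eq_isSome_get?, hdx]
        exact Option.isSome_iff_ne_none.mpr h1
      show (d.insert x (d.getD x 0 - D2.getD x 0)).items = _
      rw [PySem.Dict.items_insert_of_contains _ _ hdc]
      rw [List.filterMap_congr
        (g := fun p => some (if p.1 == x then (x, d.getD x 0 - D2.getD x 0) else p)) ?_]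
      · rw [pvFilterMap_some_eq_map]
      · intro p hp
        by_cases hpx : p.1 = x
        · have hval : d.getD x 0 = p.2 := by
            have hmem : (x, p.2) ∈ d.items := by rw [← hpx]; exact hp
            exact PySem.Dict.getD_of_mem_items d hmem hd 0
          simp [pvStep1, hpx, hc, hab, hval]
        · simp [hpx]
    · rw [if_neg hab]
      show d.items.filter (fun p => !(p.1 == x)) = _
      rw [pvErase_filterMap]
      apply List.filterMap_congr
      intro p _
      by_cases hpx : p.1 = x
      · simp [pvStep1, hpx, hc, hab]
      · simp [hpx]
  · rw [if_neg hc]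
    rw [List.filterMap_congr (g := some) ?_, List.filterMap_some]
    intro p _
    by_cases hpx : p.1 = x
    · simp [pvStep1, hpx, hc]
    · simp [hpx]

-- pvG2 acts on the items as pvStep2 at key x
lemma pvG2_items (D1 D2 : PySem.Dict String Int) (x : String)
    (d : PySem.Dict String Int) (hd : d.keys.Nodup) (hdx : d.get? x = D2.get? x) :
    (pvG2 D1 D2 x d).items
      = d.items.filterMap (fun p => if p.1 = x then pvStep2 D1 D2 p else some p) := by
  unfold pvG2
  by_cases hc : D2.contains x = true
  · have h1 : D2.get? x ≠ none := by
      intro h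
      rw [PySem.Dict.contains_eq_isSome_get?, h] at hc
      simp at hc
    have hdc : d.contains x = true := by
      rw [PySem.Dict.contains_eq_isSome_get?, hdx]
      exact Option.isSome_iff_ne_none.mpr h1
    rw [if_pos hc]
    by_cases hab : D1.getD x 0 > D2.getD x 0
    · rw [if_pos hab]
      show d.items.filter (fun p => !(p.1 == x)) = _
      rw [pvErase_filterMap]
      apply List.filterMap_congr
      intro p _
      by_cases hpx : p.1 = x
      · simp [pvStep2, hpx, hc, hab]
      · simp [hpx]
    · rw [if_neg hab]
      by_cases hba : D1.getD x 0 < D2.getD x 0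
      · rw [if_pos hba]
        show (d.insert x (d.getD x 0 - D1.getD x 0)).items = _
        rw [PySem.Dict.items_insert_of_contains _ _ hdc]
        rw [List.filterMap_congr
          (g := fun p => some (if p.1 == x then (x, d.getD x 0 - D1.getD x 0) else p)) ?_]
        · rw [pvFilterMap_some_eq_map]
        · intro p hp
          by_cases hpx : p.1 = x
          · have hval : d.getD x 0 = p.2 := by
              have hmem : (x, p.2) ∈ d.items := by rw [← hpx]; exact hp
              exact PySem.Dict.getD_of_mem_items d hmem hd 0
            simp [pvStep2, hpx, hc, hab, hba, hval]
          · simp [hpx]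
      · rw [if_neg hba]
        show d.items.filter (fun p => !(p.1 == x)) = _
        rw [pvErase_filterMap]
        apply List.filterMap_congr
        intro p _
        by_cases hpx : p.1 = x
        · simp [pvStep2, hpx, hc, hab, hba]
        · simp [hpx]
  · rw [if_neg hc]
    rw [List.filterMap_congr (g := some) ?_, List.filterMap_some]
    intro p _
    by_cases hpx : p.1 = x
    · simp [pvStep2, hpx, hc]
    · simp [hpx]

-- the loop over a pair of independent states splits into two independent folds
lemma pvFoldl_pair (g1 g2 : String → PySem.Dict String Int → PySem.Dict String Int)
    (ks : List String) (a b : PySem.Dict String Int) :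
    ks.foldl (fun p x => (g1 x p.1, g2 x p.2)) (a, b)
      = (ks.foldl (fun d x => g1 x d) a, ks.foldl (fun d x => g2 x d) b) := by
  induction ks generalizing a b with
  | nil => rfl
  | cons x ks ih => simp [List.foldl_cons, ih]

-- A's loop body is the pair of the two independent actions
lemma pvBody (D1 D2 : PySem.Dict String Int) (p : PySem.Dict String Int × PySem.Dict String Int)
    (x : String) :
    (if D2.contains x then
       if D1.getD x 0 > D2.getD x 0 then
         (p.1.modify x 0 (fun v => v - D2.getD x 0), p.2.erase x)
       else if D1.getD x 0 < D2.getD x 0 then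
         (p.1.erase x, p.2.modify x 0 (fun v => v - D1.getD x 0))
       else
         (p.1.erase x, p.2.erase x)
     else p) = (pvG1 D1 D2 x p.1, pvG2 D1 D2 x p.2) := by
  unfold pvG1 pvG2
  split_ifs <;> rfl


-- ===== VERDICT (by name: the statement is the Claim_ definition above) =====
theorem EliminateDictOverlap_spec : Claim_equal_EliminateDictOverlap := by
  intro d1 d2 _
  show EliminateDictOverlap d1 d2 = EliminateDictOverlap_alt d1 d2
  simp only [EliminateDictOverlap, EliminateDictOverlap_alt]
  set D1 := PySem.Dict.ofList d1 with hD1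
  set D2 := PySem.Dict.ofList d2 with hD2
  have hnd1 : D1.keys.Nodup := PySem.Dict.nodup_keys_ofList d1
  have hnd2 : D2.keys.Nodup := PySem.Dict.nodup_keys_ofList d2
  rw [PySem.List.foldl_congr_mem D1.keys _
        (fun p x => (pvG1 D1 D2 x p.1, pvG2 D1 D2 x p.2)) (D1, D2)
        (fun acc x _ => pvBody D1 D2 acc x),
      pvFoldl_pair]
  simp only [Prod.mk.injEq]
  constructor
  · rw [pvFoldl_items (pvG1 D1 D2) (pvStep1 D1 D2) (pvStep1_key D1 D2) D1 D1.keys hnd1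
        (fun x hx d hd hdx => pvG1_items D1 D2 x hx d hd hdx) D1 hnd1 (fun y _ => rfl)]
    apply List.filterMap_congr
    intro p hp
    have hpk : p.1 ∈ D1.keys := PySem.Dict.mem_keys_of_mem_items D1 hp
    rw [if_pos hpk]
    have hval : D1.getD p.1 0 = p.2 := PySem.Dict.getD_of_mem_items D1 hp hnd1 0
    cases h2 : D2.get? p.1 with
    | some w =>
      have hcp : D2.contains p.1 = true := by
        rw [PySem.Dict.contains_eq_isSome_get?, h2]; rfl
      have hw : D2.getD p.1 0 = w := PySem.Dict.getD_of_get?_eq_some D2 0 h2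
      simp [pvStep1, hcp, hval, hw]
    | none =>
      have hcp : D2.contains p.1 = false := by
        rw [PySem.Dict.contains_eq_isSome_get?, h2]; rfl
      simp [pvStep1, hcp]
  · rw [pvFoldl_items (pvG2 D1 D2) (pvStep2 D1 D2) (pvStep2_key D1 D2) D2 D1.keys hnd1
        (fun x _ d hd hdx => pvG2_items D1 D2 x d hd hdx) D2 hnd2 (fun y _ => rfl)]
    apply List.filterMap_congr
    intro p hp
    have hval : D2.getD p.1 0 = p.2 := PySem.Dict.getD_of_mem_items D2 hp hnd2 0
    have hcp : D2.contains p.1 = true :=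
      (PySem.Dict.contains_iff_mem_keys D2 p.1).mpr (PySem.Dict.mem_keys_of_mem_items D2 hp)
    cases h1 : D1.get? p.1 with
    | some a =>
      have hpk : p.1 ∈ D1.keys := by
        by_contra h
        rw [← PySem.Dict.get?_eq_none_iff_not_mem_keys D1 p.1] at h
        rw [h1] at h
        cases h
      rw [if_pos hpk]
      have ha : D1.getD p.1 0 = a := PySem.Dict.getD_of_get?_eq_some D1 0 h1
      simp only [pvStep2, hcp, if_true, ha, hval]
      split_ifs <;> first | rfl | (exfalso; omega)
    | none =>
      have hpk : p.1 ∉ D1.keys := (PySem.Dict.get?_eq_none_iff_not_mem_keys D1 p.1).mp h1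
      rw [if_neg hpk]
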